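-- pv_equiv track=rewrite | github.com/akaiomoi/DeepScan | API/main.py | leet_to_text
-- ===== SOURCE A (Python) =====
-- def leet_to_text(leet_str):
--     leet_dict = {'4': 'a', '8': 'b', '(': 'c', '|)': 'd', '3': 'e', '|=': 'f', '6': 'g', '|-|': 'h',
--                  '1': 'i', '_|': 'j', '|<': 'k', '|_': 'l', '|\/|': 'm', '|\\|': 'n', '0': 'o', '|2': 'r',
--                  '5': 's', '7': 't', '|_|': 'u', '\/': 'v', '\/\/': 'w', '><': 'x', '`/': 'y', '2': 'z'}
--
--     text_str = ''
--     i = 0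
--     while i < len(leet_str):
--         if leet_str[i:i + 2] in leet_dict:
--             text_str += leet_dict[leet_str[i:i + 2]]
--             i += 2
--         elif leet_str[i:i + 1] in leet_dict:
--             text_str += leet_dict[leet_str[i:i + 1]]
--             i += 1
--         else:
--             text_str += leet_str[i]
--             i += 1
--     return text_str
-- ===== SOURCE B (Python) =====
-- def leet_to_text(leet_str):
--     # Streaming state machine: one character at a time with a single pending
--     # "digram leader" character, instead of index-based slicing with 2-then-1
--     # dict membership tests.  Only the two-character codes can ever match a
--     # two-character window (the 3/4-character codes of the original table are
--     # unreachable), every digram starts with one of five leader characters,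
--     # and no leader is itself a one-character code.
--     digrams = {'|)': 'd', '|=': 'f', '_|': 'j', '|<': 'k', '|_': 'l',
--                '|2': 'r', '\\/': 'v', '><': 'x', '`/': 'y'}
--     singles = {'4': 'a', '8': 'b', '(': 'c', '3': 'e', '6': 'g',
--                '1': 'i', '0': 'o', '5': 's', '7': 't', '2': 'z'}
--     leaders = {'|', '_', '\\', '>', '`'}
--     out = []
--     pending = ''          # at most one character: a possible digram leader
--     for c in leet_str:
--         if pending:
--             d = pending + c
--             pending = ''
--             if d in digrams:
--                 out.append(digrams[d])
--                 continue
--             out.append(d[0])          # leaders are never one-char codes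
--         if c in leaders:
--             pending = c
--         else:
--             out.append(singles.get(c, c))
--     if pending:
--         out.append(pending)
--     return ''.join(out)
-- ===== Notes on version B (the rewrite author's own statement) =====
-- stated objective: alternative
-- what changed: Replaces A's index-based while loop testing 2-char then 1-char slices against one dict by a streaming per-character state machine that carries at most one pending digram-leader character, using a digram table, a singles table and a leader set (correct because every reachable multi-char code is a 2-char code starting with one of five leader characters, none of which is a 1-char code).
import Mathlib
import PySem

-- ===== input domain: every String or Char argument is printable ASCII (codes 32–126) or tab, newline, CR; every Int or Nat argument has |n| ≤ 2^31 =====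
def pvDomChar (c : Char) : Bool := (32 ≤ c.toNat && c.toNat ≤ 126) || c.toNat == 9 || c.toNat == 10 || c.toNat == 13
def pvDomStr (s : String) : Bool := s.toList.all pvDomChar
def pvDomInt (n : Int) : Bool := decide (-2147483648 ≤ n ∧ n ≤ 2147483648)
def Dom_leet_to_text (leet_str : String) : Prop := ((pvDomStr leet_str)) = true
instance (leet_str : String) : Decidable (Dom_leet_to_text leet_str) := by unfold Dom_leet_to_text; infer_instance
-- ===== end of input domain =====

-- B replaces A's index-based scan (2-char-slice then 1-char-slice dict membership)
-- by a streaming one-character-at-a-time state machine carrying one pending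
-- "digram leader" character; objective: alternative structure, same cost.
-- Strings are handled as their character lists (List Char) throughout.

-- ===== PORT A =====
-- the Python dict literal, keys and values as char lists, in insertion order
def leetDictA : PySem.Dict (List Char) (List Char) := PySem.Dict.ofList
  [(['4'], ['a']), (['8'], ['b']), (['('], ['c']), (['|', ')'], ['d']),
   (['3'], ['e']), (['|', '='], ['f']), (['6'], ['g']), (['|', '-', '|'], ['h']),
   (['1'], ['i']), (['_', '|'], ['j']), (['|', '<'], ['k']), (['|', '_'], ['l']),
   (['|', '\\', '/', '|'], ['m']), (['|', '\\', '|'], ['n']), (['0'], ['o']),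
   (['|', '2'], ['r']), (['5'], ['s']), (['7'], ['t']), (['|', '_', '|'], ['u']),
   (['\\', '/'], ['v']), (['\\', '/', '\\', '/'], ['w']), (['>', '<'], ['x']),
   (['`', '/'], ['y']), (['2'], ['z'])]

-- the while loop: acc = text_str, cs = the characters from index i on;
-- leet_str[i:i+2] is (c :: rest).take 2, leet_str[i:i+1] is [c]
def leetLoopA (acc : List Char) (cs : List Char) : List Char :=
  match cs with
  | [] => acc
  | c :: rest =>
    match leetDictA.get? ((c :: rest).take 2) with
    | some v => leetLoopA (acc ++ v) (rest.drop 1)      -- i += 2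
    | none =>
      match leetDictA.get? [c] with
      | some v => leetLoopA (acc ++ v) rest             -- i += 1
      | none => leetLoopA (acc ++ [c]) rest             -- i += 1
termination_by cs.length
decreasing_by
  · simp
  · simp
  · simp

def leet_to_text (leet_str : String) : String := String.ofList (leetLoopA [] leet_str.toList)

-- ===== PORT B =====
def digramsB : PySem.Dict (List Char) Char := PySem.Dict.ofList
  [(['|', ')'], 'd'), (['|', '='], 'f'), (['_', '|'], 'j'), (['|', '<'], 'k'),
   (['|', '_'], 'l'), (['|', '2'], 'r'), (['\\', '/'], 'v'), (['>', '<'], 'x'),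
   (['`', '/'], 'y')]

def singlesB : PySem.Dict Char Char := PySem.Dict.ofList
  [('4', 'a'), ('8', 'b'), ('(', 'c'), ('3', 'e'), ('6', 'g'),
   ('1', 'i'), ('0', 'o'), ('5', 's'), ('7', 't'), ('2', 'z')]

def leadersB : List Char := ['|', '_', '\\', '>', '`']

-- the body of the for loop: state = (out, pending); '' pending = none
def stepB (st : List Char × Option Char) (c : Char) : List Char × Option Char :=
  match st with
  | (out, some p) =>
    match digramsB.get? [p, c] with
    | some r => (out ++ [r], none)                      -- continue
    | none =>                                           -- emit d[0] = p, re-dispatch on c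
      if c ∈ leadersB then (out ++ [p], some c)
      else (out ++ [p] ++ [singlesB.getD c c], none)
  | (out, none) =>
    if c ∈ leadersB then (out, some c)
    else (out ++ [singlesB.getD c c], none)

-- the trailing 'if pending: out.append(pending)'
def finishB (st : List Char × Option Char) : List Char :=
  match st with
  | (out, some p) => out ++ [p]
  | (out, none) => out

def leet_to_text_alt (leet_str : String) : String :=
  String.ofList (finishB (leet_str.toList.foldl stepB ([], none)))

-- ===== PRECONDITION & SPEC =====
def Spec_leet_to_text (leet_str : String) (out : String) : Prop := out = leet_to_text_alt leet_str
instance (leet_str : String) (out : String) : Decidable (Spec_leet_to_text leet_str out) := by unfold Spec_leet_to_text; infer_instance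

-- ===== CLAIM (what is proved, stated in full; the proofs are below) =====
def Claim_equal_leet_to_text : Prop := ∀ (leet_str : String), Dom_leet_to_text leet_str → Spec_leet_to_text leet_str (leet_to_text leet_str)

-- ===== LEMMAS AND PROOFS =====


theorem itemsA_eq : leetDictA.items =
  [(['4'], ['a']), (['8'], ['b']), (['('], ['c']), (['|', ')'], ['d']),
   (['3'], ['e']), (['|', '='], ['f']), (['6'], ['g']), (['|', '-', '|'], ['h']),
   (['1'], ['i']), (['_', '|'], ['j']), (['|', '<'], ['k']), (['|', '_'], ['l']),
   (['|', '\\', '/', '|'], ['m']), (['|', '\\', '|'], ['n']), (['0'], ['o']),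
   (['|', '2'], ['r']), (['5'], ['s']), (['7'], ['t']), (['|', '_', '|'], ['u']),
   (['\\', '/'], ['v']), (['\\', '/', '\\', '/'], ['w']), (['>', '<'], ['x']),
   (['`', '/'], ['y']), (['2'], ['z'])] := by decide

theorem itemsD_eq : digramsB.items =
  [(['|', ')'], 'd'), (['|', '='], 'f'), (['_', '|'], 'j'), (['|', '<'], 'k'),
   (['|', '_'], 'l'), (['|', '2'], 'r'), (['\\', '/'], 'v'), (['>', '<'], 'x'),
   (['`', '/'], 'y')] := by decide

theorem itemsS_eq : singlesB.items =
  [('4', 'a'), ('8', 'b'), ('(', 'c'), ('3', 'e'), ('6', 'g'),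
   ('1', 'i'), ('0', 'o'), ('5', 's'), ('7', 't'), ('2', 'z')] := by decide

-- A's two-char lookup is exactly B's digram table
theorem lookup2_eq (c1 c2 : Char) :
    leetDictA.get? [c1, c2] = (digramsB.get? [c1, c2]).map (fun r => [r]) := by
  simp [PySem.Dict.get?, itemsA_eq, itemsD_eq, List.find?]
  repeat' split <;> simp_all

-- A's one-char lookup is exactly B's singles table
theorem lookup1_eq (c : Char) :
    leetDictA.get? [c] = (singlesB.get? c).map (fun r => [r]) := by
  simp [PySem.Dict.get?, itemsA_eq, itemsS_eq, List.find?]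
  repeat' split <;> simp_all

-- every digram starts with a leader
theorem digram_leader (c1 c2 : Char) (h : c1 ∉ leadersB) :
    digramsB.get? [c1, c2] = none := by
  simp [leadersB] at h
  simp [PySem.Dict.get?, itemsD_eq, List.find?]
  repeat' split <;> simp_all [@eq_comm Char]

-- no leader is a one-char code
theorem leader_not_single (c : Char) (h : c ∈ leadersB) : singlesB.get? c = none := by
  simp [leadersB] at h
  rcases h with h | h | h | h | h <;> subst h <;> decide

theorem main_aux : ∀ (n : Nat) (cs : List Char), cs.length ≤ n →
    (∀ acc, finishB (cs.foldl stepB (acc, none)) = leetLoopA acc cs) ∧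
    (∀ acc c, c ∈ leadersB →
      finishB (cs.foldl stepB (acc, some c)) = leetLoopA acc (c :: cs)) := by
  intro n
  induction n with
  | zero =>
    intro cs h
    have hc : cs = [] := List.eq_nil_of_length_eq_zero (Nat.le_zero.mp h)
    subst hc
    refine ⟨fun acc => by simp [finishB, leetLoopA], fun acc c hl => ?_⟩
    have h1 : leetDictA.get? [c] = none := by
      rw [lookup1_eq, leader_not_single c hl]; rfl
    simp only [List.foldl_nil, finishB]
    rw [leetLoopA]
    simp [h1, leetLoopA]
  | succ n ih =>
    intro cs h
    have part1 : ∀ acc, finishB (cs.foldl stepB (acc, none)) = leetLoopA acc cs := by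
      intro acc
      cases cs with
      | nil => simp [finishB, leetLoopA]
      | cons c rest =>
        have hr : rest.length ≤ n := by simp at h; omega
        rw [List.foldl_cons]
        by_cases hl : c ∈ leadersB
        · simp only [stepB, hl, if_pos]
          rw [(ih rest hr).2 acc c hl]
        · simp only [stepB, hl, if_false]
          rw [(ih rest hr).1]
          rw [leetLoopA]
          cases rest with
          | nil =>
            have h1 := lookup1_eq c
            cases hs : singlesB.get? c with
            | some r =>
              simp only [List.take, h1, hs, Option.map]
              simp [leetLoopA, PySem.Dict.getD, hs]
            | none =>
              simp only [List.take, h1, hs, Option.map]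
              simp [leetLoopA, PySem.Dict.getD, hs]
          | cons c2 t =>
            have h2 : leetDictA.get? [c, c2] = none := by
              rw [lookup2_eq, digram_leader c c2 hl]; rfl
            have h1 := lookup1_eq c
            cases hs : singlesB.get? c with
            | some r => simp [List.take, h2, h1, hs, PySem.Dict.getD]
            | none => simp [List.take, h2, h1, hs, PySem.Dict.getD]
    refine ⟨part1, fun acc c hl => ?_⟩
    cases cs with
    | nil =>
      have h1 : leetDictA.get? [c] = none := by
        rw [lookup1_eq, leader_not_single c hl]; rfl
      simp only [List.foldl_nil, finishB]
      rw [leetLoopA]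
      simp [h1, leetLoopA]
    | cons c2 t =>
      have ht : t.length ≤ n := by simp at h; omega
      rw [List.foldl_cons, leetLoopA]
      simp only [List.take]
      rw [lookup2_eq]
      cases hd : digramsB.get? [c, c2] with
      | some r =>
        simp only [stepB, hd, Option.map, List.drop]
        rw [(ih t ht).1]
      | none =>
        have h1 : leetDictA.get? [c] = none := by
          rw [lookup1_eq, leader_not_single c hl]; rfl
        simp only [stepB, hd, Option.map, h1]
        -- B's re-dispatch on c2 from (acc ++ [c], none) is one foldl step over (c2 :: t)
        have hstep : (if c2 ∈ leadersB then (acc ++ [c], some c2)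
            else (acc ++ [c] ++ [singlesB.getD c2 c2], none))
            = stepB (acc ++ [c], none) c2 := by
          simp [stepB]
        rw [hstep, ← List.foldl_cons]
        exact part1 (acc ++ [c])

-- ===== VERDICT (by name: the statement is the Claim_ definition above) =====
theorem leet_to_text_spec : Claim_equal_leet_to_text := by
  intro s _
  unfold Spec_leet_to_text leet_to_text leet_to_text_alt
  rw [(main_aux s.toList.length s.toList le_rfl).1 []]
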